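-- pv_equiv track=rewrite | github.com/JacobRammer/CIS-210 | Alphapin Encoding/p41_alphapin.py | alphapinEncode
-- ===== SOURCE A (Python) =====
-- VOWELS = "aeiou"
--
-- CONSONANTS = "bcdfghjklmnpqrstvwyz"
--
-- def alphapinEncode(pin):
--     """(int) -> string
--
--     This function will encrypt the pin parameter provided and will return it as a string with alternating constant and
--     vowels. Assigns letters based on location
--
--     >>> alphapinEncode(5165)
--     'nera'
--     >>> alphapinEncode(6198191965198194196)
--     'cefuveyezenezofuleze'
--
--     """
--
--     encodedPin = ""
--
--     while pin > 0:
--         lastTwoDig = pin % 100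
--         encodedPin = VOWELS[lastTwoDig % 5] + encodedPin
--         encodedPin = CONSONANTS[lastTwoDig // 5] + encodedPin
--
--         pin = pin // 100  # removes the last two digits from pin
--
--     return encodedPin
-- ===== SOURCE B (Python) =====
-- VOWELS = "aeiou"
--
-- CONSONANTS = "bcdfghjklmnpqrstvwyz"
--
--
-- def alphapinEncode(pin):
--     # Count the base-100 digit pairs, then emit them most-significant-first
--     # into a list joined at the end (A peels least-significant-first and
--     # prepends onto a string).
--     k = 0
--     t = pin
--     while t > 0:
--         t //= 100
--         k += 1
--     parts = []
--     for i in range(k - 1, -1, -1):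
--         d = (pin // 100 ** i) % 100
--         parts.append(CONSONANTS[d // 5] + VOWELS[d % 5])
--     return ''.join(parts)
-- ===== Notes on version B (the rewrite author's own statement) =====
-- stated objective: alternative
-- what changed: B first counts the base-100 digit pairs, then emits them most-significant-first via (pin // 100**i) % 100 into a list joined at the end, instead of A's least-significant-first peeling loop that prepends onto a string accumulator.
import Mathlib
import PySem

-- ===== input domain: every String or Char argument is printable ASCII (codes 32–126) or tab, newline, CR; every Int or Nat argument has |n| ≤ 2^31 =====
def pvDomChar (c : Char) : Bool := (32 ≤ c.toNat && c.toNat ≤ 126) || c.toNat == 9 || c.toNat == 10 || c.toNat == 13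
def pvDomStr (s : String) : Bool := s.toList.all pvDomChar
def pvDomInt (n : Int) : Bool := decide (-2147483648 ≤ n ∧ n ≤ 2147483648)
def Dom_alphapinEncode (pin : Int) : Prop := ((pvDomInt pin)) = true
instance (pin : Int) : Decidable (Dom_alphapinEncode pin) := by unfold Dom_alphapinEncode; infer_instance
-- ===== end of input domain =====

-- B emits the base-100 pairs most-significant-first into a list joined at the end; A peels
-- least-significant-first prepending onto a string. Same return value for every int.

-- ===== PORT A =====
def pvVowels : List Char := ['a', 'e', 'i', 'o', 'u']
def pvConsonants : List Char := ['b','c','d','f','g','h','j','k','l','m','n','p','q','r','s','t','v','w','y','z']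

-- CONSONANTS[d // 5] + VOWELS[d % 5]; the indices are always in range (0 ≤ d < 100), so pyGetD is exact here
def pvPairA (d : Int) : List Char :=
  [PySem.List.pyGetD pvConsonants (PySem.Int.floordiv d 5) 'a',
   PySem.List.pyGetD pvVowels (PySem.Int.mod d 5) 'a']

-- the while loop of A, prepending each pair onto the accumulator
def pvLoopA (pin : Int) (acc : List Char) : List Char :=
  if 0 < pin then
    pvLoopA (PySem.Int.floordiv pin 100) (pvPairA (PySem.Int.mod pin 100) ++ acc)
  else acc
termination_by pin.toNat
decreasing_by
  have : PySem.Int.floordiv pin 100 = pin / 100 := PySem.Int.floordiv_eq_ediv_of_pos (by omega)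
  rw [this]; omega

def alphapinEncode (pin : Int) : String := String.ofList (pvLoopA pin [])

-- ===== PORT B =====
-- k = 0; while t > 0: t //= 100; k += 1
def pvCountPairs (t : Int) : Nat :=
  if 0 < t then pvCountPairs (PySem.Int.floordiv t 100) + 1 else 0
termination_by t.toNat
decreasing_by
  have : PySem.Int.floordiv t 100 = t / 100 := PySem.Int.floordiv_eq_ediv_of_pos (by omega)
  rw [this]; omega

def pvPairB (d : Int) : List Char :=
  [PySem.List.pyGetD pvConsonants (PySem.Int.floordiv d 5) 'a',
   PySem.List.pyGetD pvVowels (PySem.Int.mod d 5) 'a']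

-- d = (pin // 100 ** i) % 100; every i drawn from the range is ≥ 0, so 100 ** i = 100 ^ i.toNat exactly
def pvDigB (pin i : Int) : Int :=
  PySem.Int.mod (PySem.Int.floordiv pin ((100 : Int) ^ i.toNat)) 100

def alphapinEncode_alt (pin : Int) : String :=
  let k := pvCountPairs pin
  let parts : List (List Char) :=
    (PySem.List.pyRange ((k : Int) - 1) (-1) (-1)).foldl
      (fun acc i => acc ++ [pvPairB (pvDigB pin i)]) []
  String.ofList parts.flatten

-- ===== PRECONDITION & SPEC =====
def Spec_alphapinEncode (pin : Int) (out : String) : Prop := out = alphapinEncode_alt pin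
instance (pin : Int) (out : String) : Decidable (Spec_alphapinEncode pin out) := by unfold Spec_alphapinEncode; infer_instance

-- ===== CLAIM (what is proved, stated in full; the proofs are below) =====
def Claim_equal_alphapinEncode : Prop := ∀ (pin : Int), Dom_alphapinEncode pin → Spec_alphapinEncode pin (alphapinEncode pin)

-- ===== LEMMAS AND PROOFS =====

-- reference: the encoded pair list, least-significant pair last
def pvE (pin : Int) : List Char :=
  if 0 < pin then pvE (PySem.Int.floordiv pin 100) ++ pvPairA (PySem.Int.mod pin 100) else []
termination_by pin.toNat
decreasing_by
  have : PySem.Int.floordiv pin 100 = pin / 100 := PySem.Int.floordiv_eq_ediv_of_pos (by omega)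
  rw [this]; omega

theorem pvLoopA_eq (pin : Int) (acc : List Char) : pvLoopA pin acc = pvE pin ++ acc := by
  fun_induction pvLoopA pin acc with
  | case1 pin acc h ih => rw [pvE, if_pos h, ih, List.append_assoc]
  | case2 pin acc h => rw [pvE, if_neg h]; rfl

-- range(m, -1, -1) splits into its shifted tail-range plus the final 0
theorem pvRangeSplit (m : Int) (hm : 0 ≤ m) :
    PySem.List.pyRange m (-1) (-1) =
      (PySem.List.pyRange (m - 1) (-1) (-1)).map (· + 1) ++ [0] := by
  have h1 : (m - -1).toNat = (m - 1 - -1).toNat + 1 := by omega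
  rw [PySem.List.pyRange_neg_one, PySem.List.pyRange_neg_one, h1, List.range_succ]
  simp only [List.map_append, List.map_map, List.map_cons, List.map_nil]
  have h2 : m - ((m - 1 - -1).toNat : Int) = 0 := by omega
  rw [h2]
  congr 1
  exact List.map_congr_left (fun j _ => by simp [Function.comp]; omega)

-- (pin // 100 ** (i+1)) % 100 = ((pin // 100) // 100 ** i) % 100  for 0 ≤ i
theorem pvDigB_shift (pin i : Int) (hi : 0 ≤ i) :
    pvDigB pin (i + 1) = pvDigB (PySem.Int.floordiv pin 100) i := by
  unfold pvDigB
  have hp : (0:Int) < 100 ^ i.toNat := by positivity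
  have hp' : (0:Int) < 100 ^ (i+1).toNat := by positivity
  rw [PySem.Int.floordiv_eq_ediv_of_pos hp', PySem.Int.floordiv_eq_ediv_of_pos hp,
      PySem.Int.floordiv_eq_ediv_of_pos (by norm_num : (0:Int) < 100)]
  rw [Int.ediv_ediv_of_nonneg (by norm_num : (0:Int) ≤ 100)]
  congr 2
  have h1 : (i + 1).toNat = i.toNat + 1 := by omega
  rw [h1, pow_succ, mul_comm]

theorem pvDigB_zero (pin : Int) : pvDigB pin 0 = PySem.Int.mod pin 100 := by
  unfold pvDigB
  norm_num [PySem.Int.floordiv_eq_ediv_of_pos]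

theorem pvB_eq (pin : Int) :
    ((PySem.List.pyRange ((pvCountPairs pin : Int) - 1) (-1) (-1)).foldl
      (fun acc i => acc ++ [pvPairB (pvDigB pin i)]) []).flatten = pvE pin := by
  rw [show (List.foldl (fun acc i => acc ++ [pvPairB (pvDigB pin i)]) []
        (PySem.List.pyRange ((pvCountPairs pin : Int) - 1) (-1) (-1)))
      = (PySem.List.pyRange ((pvCountPairs pin : Int) - 1) (-1) (-1)).map
          (fun i => pvPairB (pvDigB pin i)) from by
    simpa using PySem.List.foldl_append_singleton_eq_map (fun i => pvPairB (pvDigB pin i)) _ []]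
  fun_induction pvE pin with
  | case1 pin h ih =>
    rw [pvCountPairs]
    simp only [h, if_true]
    have hk : ((pvCountPairs (PySem.Int.floordiv pin 100) + 1 : Nat) : Int) - 1
        = (pvCountPairs (PySem.Int.floordiv pin 100) : Int) := by push_cast; ring
    rw [hk, pvRangeSplit _ (by positivity)]
    rw [List.map_append, List.flatten_append, List.map_map]
    have hmap : (PySem.List.pyRange ((pvCountPairs (PySem.Int.floordiv pin 100) : Int) - 1) (-1) (-1)).map
          ((fun i => pvPairB (pvDigB pin i)) ∘ (· + 1))
        = (PySem.List.pyRange ((pvCountPairs (PySem.Int.floordiv pin 100) : Int) - 1) (-1) (-1)).map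
          (fun i => pvPairB (pvDigB (PySem.Int.floordiv pin 100) i)) := by
      refine List.map_congr_left (fun i hi => ?_)
      have := (PySem.List.mem_pyRange_neg_one).mp hi
      simp only [Function.comp]
      rw [pvDigB_shift pin i (by omega)]
    rw [hmap, ih]
    simp [pvDigB_zero, pvPairB, pvPairA]
  | case2 pin h =>
    rw [pvCountPairs]
    simp only [h, if_false]
    rw [show ((0:Nat):Int) - 1 = -1 from by norm_num,
        PySem.List.pyRange_neg_one_eq_nil (by norm_num)]
    rfl

-- ===== VERDICT (by name: the statement is the Claim_ definition above) =====
theorem alphapinEncode_spec : Claim_equal_alphapinEncode := by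
  intro pin _
  show String.ofList (pvLoopA pin []) =
    String.ofList (((PySem.List.pyRange ((pvCountPairs pin : Int) - 1) (-1) (-1)).foldl
      (fun acc i => acc ++ [pvPairB (pvDigB pin i)]) []).flatten)
  rw [pvLoopA_eq, pvB_eq, List.append_nil]
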